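-- pv_equiv track=rewrite | github.com/wyk18703232953/myResearch | codeComplex/data copy/filteredData/python/np/python_np_0370.py | generate_test_case
-- ===== SOURCE A (Python) =====
-- def generate_test_case(case_id, n):
--     rows = n
--     cols = min(n, 10)
--     arr = []
--     base = case_id * 100000
--     for i in range(rows):
--         row = [((base + i * cols + j) % 1000) for j in range(cols)]
--         arr.append(row)
--     return rows, cols, arr
-- ===== SOURCE B (Python) =====
-- def generate_test_case(case_id, n):
--     rows = n
--     cols = min(n, 10)
--     base = case_id * 100000
--     total = rows * cols if rows > 0 else 0
--     flat = [(base + k) % 1000 for k in range(total)]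
--     arr = [flat[i * cols:(i + 1) * cols] for i in range(rows)]
--     return rows, cols, arr
-- ===== Notes on version B (the rewrite author's own statement) =====
-- stated objective: alternative
-- what changed: A fills the grid with nested loops computing each cell's index as i*cols+j; B generates all rows*cols values in one flat linear pass (clamped to 0 for non-positive n) and then reshapes the flat list into rows by slicing.
import Mathlib
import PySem

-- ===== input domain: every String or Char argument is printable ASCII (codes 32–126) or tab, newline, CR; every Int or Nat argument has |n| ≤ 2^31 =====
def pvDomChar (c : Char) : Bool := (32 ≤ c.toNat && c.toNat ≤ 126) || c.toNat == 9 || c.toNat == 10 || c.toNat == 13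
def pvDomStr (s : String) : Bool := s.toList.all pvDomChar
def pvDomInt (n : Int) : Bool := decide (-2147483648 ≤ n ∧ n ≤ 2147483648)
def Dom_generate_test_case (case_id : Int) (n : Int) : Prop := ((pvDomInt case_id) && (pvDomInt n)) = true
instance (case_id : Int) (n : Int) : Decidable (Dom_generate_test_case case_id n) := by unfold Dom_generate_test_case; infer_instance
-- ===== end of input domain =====

-- B builds the grid as one flat linear pass then reshapes by slicing (alternative decomposition, same cost).


-- ===== PORT A =====
def generate_test_case (case_id : Int) (n : Int) : Int × Int × List (List Int) :=
  let rows := n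
  let cols := min n 10
  let base := case_id * 100000
  let arr := (PySem.List.pyRange 0 rows 1).foldl
    (fun arr i =>
      arr ++ [(PySem.List.pyRange 0 cols 1).map (fun j => PySem.Int.mod (base + i * cols + j) 1000)])
    []
  (rows, cols, arr)

-- ===== PORT B =====
def generate_test_case_alt (case_id : Int) (n : Int) : Int × Int × List (List Int) :=
  let rows := n
  let cols := min n 10
  let base := case_id * 100000
  let total := if rows > 0 then rows * cols else 0
  let flat := (PySem.List.pyRange 0 total 1).map (fun k => PySem.Int.mod (base + k) 1000)
  let arr := (PySem.List.pyRange 0 rows 1).map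
    (fun i => PySem.List.slice flat (some (i * cols)) (some ((i + 1) * cols)))
  (rows, cols, arr)

-- ===== PRECONDITION & SPEC =====
def Spec_generate_test_case (case_id : Int) (n : Int) (out : Int × Int × List (List Int)) : Prop := out = generate_test_case_alt case_id n
instance (case_id : Int) (n : Int) (out : Int × Int × List (List Int)) : Decidable (Spec_generate_test_case case_id n out) := by unfold Spec_generate_test_case; infer_instance

-- ===== CLAIM (what is proved, stated in full; the proofs are below) =====
def Claim_equal_generate_test_case : Prop := ∀ (case_id : Int) (n : Int), Dom_generate_test_case case_id n → Spec_generate_test_case case_id n (generate_test_case case_id n)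

-- ===== LEMMAS AND PROOFS =====

-- ===== VERDICT (by name: the statement is the Claim_ definition above) =====
lemma pv_row_eq (base c i T : Int) (hc : 0 < c) (h0 : 0 ≤ i) (hiT : i * c + c ≤ T) :
    PySem.List.slice ((PySem.List.pyRange 0 T 1).map (fun k => PySem.Int.mod (base + k) 1000))
      (some (i * c)) (some ((i + 1) * c))
    = (PySem.List.pyRange 0 c 1).map (fun j => PySem.Int.mod (base + i * c + j) 1000) := by
  have hic : 0 ≤ i * c := mul_nonneg h0 (le_of_lt hc)
  have hsum : (i + 1) * c = i * c + c := by ring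
  rw [PySem.List.slice_toNat _ hic (by nlinarith)]
  rw [PySem.List.pyRange_one 0 T, PySem.List.pyRange_one 0 c]
  have hTc : (i * c).toNat + c.toNat ≤ (T - 0).toNat := by omega
  apply List.ext_getElem
  · simp
    omega
  · intro k h1 h2
    simp only [List.getElem_take, List.getElem_drop, List.getElem_map, List.getElem_range]
    congr 1
    push_cast [Int.toNat_of_nonneg hic]
    omega

theorem generate_test_case_spec : Claim_equal_generate_test_case := by
  intro case_id n _
  unfold Spec_generate_test_case generate_test_case generate_test_case_alt
  by_cases hn : 0 < n
  · simp only [hn, if_pos, PySem.List.foldl_append_singleton_eq_map, List.nil_append]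
    refine congrArg _ (congrArg _ ?_)
    apply List.map_congr_left
    intro i hi
    rw [PySem.List.mem_pyRange_one] at hi
    have hc : 0 < min n 10 := by omega
    rw [pv_row_eq _ _ _ _ hc hi.1 (by nlinarith [hi.2, min_le_left n 10])]
  · have hnil : PySem.List.pyRange 0 n 1 = [] := PySem.List.pyRange_one_eq_nil (by omega)
    simp [hnil, hn]
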